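-- pv_equiv track=rewrite | github.com/ghudeihed/secure_chain_kg | backend/app/sparql_client.py | _is_valid_parameter
-- ===== SOURCE A (Python) =====
-- def _is_valid_parameter(value: str) -> bool:
--     """Validate parameter to prevent SPARQL injection."""
--     if not isinstance(value, str):
--         return False
--
--     dangerous_patterns = {
--         "INSERT", "DELETE", "DROP", "LOAD", "CLEAR", "CREATE",
--         "CONSTRUCT", "DESCRIBE", ";", "--", "/*", "*/"
--     }
--
--     return not any(pattern.upper() in value.upper() for pattern in dangerous_patterns)
-- ===== SOURCE B (Python) =====
-- import re
--
-- _DANGEROUS = ("INSERT", "DELETE", "DROP", "LOAD", "CLEAR", "CREATE",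
--               "CONSTRUCT", "DESCRIBE", ";", "--", "/*", "*/")
-- # One compiled alternation of the escaped literal patterns (all already uppercase).
-- _DANGEROUS_RE = re.compile("|".join(re.escape(p) for p in _DANGEROUS))
--
--
-- def _is_valid_parameter(value: str) -> bool:
--     """Validate parameter to prevent SPARQL injection."""
--     if not isinstance(value, str):
--         return False
--     return _DANGEROUS_RE.search(value.upper()) is None
-- ===== Notes on version B (the rewrite author's own statement) =====
-- stated objective: idiomatic
-- what changed: Replaces twelve separate substring scans (each recomputing value.upper()) by uppercasing once and running a single precompiled regex alternation of the escaped literal patterns over the string.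
import Mathlib
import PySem

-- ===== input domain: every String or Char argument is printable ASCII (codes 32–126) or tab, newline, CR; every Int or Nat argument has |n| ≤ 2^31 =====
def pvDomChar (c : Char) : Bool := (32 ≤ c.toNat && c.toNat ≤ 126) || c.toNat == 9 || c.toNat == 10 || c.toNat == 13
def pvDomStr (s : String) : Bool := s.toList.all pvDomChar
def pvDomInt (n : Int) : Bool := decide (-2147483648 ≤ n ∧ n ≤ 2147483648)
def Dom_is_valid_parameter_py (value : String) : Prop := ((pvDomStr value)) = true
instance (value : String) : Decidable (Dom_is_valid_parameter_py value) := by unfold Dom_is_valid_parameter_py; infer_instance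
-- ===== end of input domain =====

-- B uppercases once and does a single left-to-right pass with a precompiled alternation of the
-- literal dangerous patterns, instead of A's twelve separate substring scans; same return value.


-- ===== PORT A =====
-- A iterates a Python set of patterns; the result is an 'any' over them, so iteration order is
-- irrelevant and the set is ported as a list. The isinstance guard is vacuous for a String input.
def pvDangerousPatterns : List String :=
  ["INSERT", "DELETE", "DROP", "LOAD", "CLEAR", "CREATE",
   "CONSTRUCT", "DESCRIBE", ";", "--", "/*", "*/"]

def is_valid_parameter_py (value : String) : Bool :=
  !(pvDangerousPatterns.any (fun p => PySem.Str.isIn (PySem.Str.upper p) (PySem.Str.upper value)))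

-- ===== PORT B =====
-- The compiled regex is an alternation of the escaped LITERAL patterns, so re.search finds a match
-- iff some position of the string starts one of the literals; that semantics is ported exactly as a
-- single left-to-right scan over the suffixes (no pattern is empty, so the empty suffix never matches).
def pvAltPatterns : List (List Char) :=
  ["INSERT".toList, "DELETE".toList, "DROP".toList, "LOAD".toList, "CLEAR".toList,
   "CREATE".toList, "CONSTRUCT".toList, "DESCRIBE".toList,
   ";".toList, "--".toList, "/*".toList, "*/".toList]

def pvSearchAny : List Char → Bool
  | [] => false
  | c :: rest => pvAltPatterns.any (fun p => p.isPrefixOf (c :: rest)) || pvSearchAny rest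

def is_valid_parameter_py_alt (value : String) : Bool :=
  !(pvSearchAny (PySem.Str.upper value).toList)

-- ===== PRECONDITION & SPEC =====
def Spec_is_valid_parameter_py (value : String) (out : Bool) : Prop := out = is_valid_parameter_py_alt value
instance (value : String) (out : Bool) : Decidable (Spec_is_valid_parameter_py value out) := by unfold Spec_is_valid_parameter_py; infer_instance

-- ===== CLAIM (what is proved, stated in full; the proofs are below) =====
def Claim_equal_is_valid_parameter_py : Prop := ∀ (value : String), Dom_is_valid_parameter_py value → Spec_is_valid_parameter_py value (is_valid_parameter_py value)

-- ===== LEMMAS AND PROOFS =====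

-- The scan returns true iff some alternation pattern is an infix of the scanned characters.
theorem pvSearchAny_iff (s : List Char) :
    pvSearchAny s = true ↔ ∃ p ∈ pvAltPatterns, p <:+: s := by
  induction s with
  | nil =>
    simp only [pvSearchAny, List.infix_nil]
    constructor
    · intro h; cases h
    · rintro ⟨p, hp, rfl⟩
      revert hp; decide
  | cons c rest ih =>
    simp only [pvSearchAny, Bool.or_eq_true, List.any_eq_true, ih,
      List.isPrefixOf_iff_prefix]
    constructor
    · rintro (⟨p, hp, hpre⟩ | ⟨p, hp, hinf⟩)
      · exact ⟨p, hp, hpre.isInfix⟩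
      · exact ⟨p, hp, hinf.trans (List.suffix_cons c rest |>.isInfix)⟩
    · rintro ⟨p, hp, hinf⟩
      rcases (List.infix_cons_iff).1 hinf with hpre | hinf'
      · exact Or.inl ⟨p, hp, hpre⟩
      · exact Or.inr ⟨p, hp, hinf'⟩

-- B's pattern table is A's pattern table, uppercased and taken to character lists.
theorem pvAltPatterns_eq :
    pvAltPatterns = pvDangerousPatterns.map (fun p => (PySem.Str.upper p).toList) := by
  decide

-- ===== VERDICT (by name: the statement is the Claim_ definition above) =====
theorem is_valid_parameter_py_spec : Claim_equal_is_valid_parameter_py := by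
  intro value _
  unfold Spec_is_valid_parameter_py
  unfold is_valid_parameter_py is_valid_parameter_py_alt
  congr 1
  rw [Bool.eq_iff_iff]
  simp only [List.any_eq_true, pvSearchAny_iff, pvAltPatterns_eq, List.mem_map,
    PySem.Str.isIn_iff_infix]
  constructor
  · rintro ⟨p, hp, hinf⟩
    exact ⟨_, ⟨p, hp, rfl⟩, hinf⟩
  · rintro ⟨q, ⟨p, hp, rfl⟩, hinf⟩
    exact ⟨p, hp, hinf⟩
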